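-- pv_equiv track=rewrite | github.com/manwar/perlweeklychallenge-club | challenge-311/pokgopun/python/ch-2.py | gds
-- ===== SOURCE A (Python) =====
-- def gds(string: str, n: int) -> str:
--     while True:
--         l = len(string)
--         if l <= n:
--             break
--         string = "".join(
--                 str(d) for d in (
--                     sum(
--                         int(e) for e in string[i*n:i*n+n]
--                         ) for i in range(l//n + (l%n > 0))
--                     )
--                 )
--     return string
-- ===== SOURCE B (Python) =====
-- def reduce_once(s: str, n: int) -> str:
--     parts = []
--     cnt = 0
--     acc = 0
--     for ch in s:
--         acc += int(ch)
--         cnt += 1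
--         if cnt == n:
--             parts.append(str(acc))
--             cnt = 0
--             acc = 0
--     if cnt > 0:
--         parts.append(str(acc))
--     return "".join(parts)
--
--
-- def gds(string: str, n: int) -> str:
--     if len(string) <= n:
--         return string
--     return gds(reduce_once(string, n), n)
-- ===== Notes on version B (the rewrite author's own statement) =====
-- stated objective: alternative
-- what changed: Each reduction pass is a single character-by-character scan carrying a running counter and group sum (emitting a group whenever the counter reaches n) instead of A's index-arithmetic nested generators that slice each chunk out with string[i*n:i*n+n], and the outer while-loop becomes tail recursion on the reduced string.
import Mathlib
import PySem

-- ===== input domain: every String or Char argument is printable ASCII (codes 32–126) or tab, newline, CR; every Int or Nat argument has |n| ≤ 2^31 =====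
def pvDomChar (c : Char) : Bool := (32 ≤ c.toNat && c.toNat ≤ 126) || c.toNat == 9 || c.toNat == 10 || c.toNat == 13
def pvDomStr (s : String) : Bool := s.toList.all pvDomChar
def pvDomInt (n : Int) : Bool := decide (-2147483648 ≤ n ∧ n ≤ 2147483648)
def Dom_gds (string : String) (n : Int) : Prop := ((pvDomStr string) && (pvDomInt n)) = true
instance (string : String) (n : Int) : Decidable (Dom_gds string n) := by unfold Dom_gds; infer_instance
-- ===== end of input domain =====

-- B replaces A's index-arithmetic nested generators (slice each chunk out by i*n:i*n+n) by a single
-- character-by-character scan with a running counter/sum, and the while-loop by tail recursion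
-- (objective: alternative decomposition, same asymptotic cost).

-- ===== PORT A =====
-- int(e) for a one-character string e; the .getD 0 default is unreachable on Pre_ inputs
-- (Python raises ValueError there, excluded by Pre_gds).
def pvVal (c : Char) : Int := (PySem.Int.ofChars? [c]).getD 0

-- one body of A's while-loop: "".join(str(d) for d in (sum(int(e) for e in string[i*n:i*n+n]) for i in range(l//n + (l%n > 0))))
def gdsPass (cs : List Char) (n : Int) : List Char :=
  let l : Int := cs.length
  PySem.Chars.join []
    (((PySem.List.pyRange 0 (PySem.Int.floordiv l n + (if 0 < PySem.Int.mod l n then 1 else 0)) 1).map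
        (fun i => ((PySem.List.slice cs (some (i * n)) (some (i * n + n))).map pvVal).sum)).map
      PySem.Int.toChars)

-- A's "while True" as fuel recursion; the fuel 10*len+1 only makes the definition total: on every
-- Pre_gds input the loop exits before the fuel runs out (each pass lexicographically decreases
-- (total digit sum, length)), so this computes exactly what A's unbounded loop computes there.
def gdsLoop : Nat → List Char → Int → List Char
  | 0, cs, _ => cs
  | fuel + 1, cs, n => if (cs.length : Int) ≤ n then cs else gdsLoop fuel (gdsPass cs n) n

def gds (string : String) (n : Int) : String :=
  String.ofList (gdsLoop (10 * string.toList.length + 1) string.toList n)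

-- ===== PORT B =====
-- one step of reduce_once's for-loop; state = (cnt, acc, parts)
def pvStep (n : Int) (st : Int × Int × List (List Char)) (ch : Char) : Int × Int × List (List Char) :=
  let acc := st.2.1 + pvVal ch
  let cnt := st.1 + 1
  if cnt == n then (0, 0, st.2.2 ++ [PySem.Int.toChars acc]) else (cnt, acc, st.2.2)

def reduceOnce (cs : List Char) (n : Int) : List Char :=
  let st := cs.foldl (pvStep n) (0, 0, [])
  PySem.Chars.join [] (if 0 < st.1 then st.2.2 ++ [PySem.Int.toChars st.2.1] else st.2.2)

-- B's tail recursion, with the same totality fuel as port A (B's Python recursion terminates on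
-- every Pre_gds input for the same measure reason).
def gdsAltLoop : Nat → List Char → Int → List Char
  | 0, cs, _ => cs
  | fuel + 1, cs, n => if (cs.length : Int) ≤ n then cs else gdsAltLoop fuel (reduceOnce cs n) n

def gds_alt (string : String) (n : Int) : String :=
  String.ofList (gdsAltLoop (10 * string.toList.length + 1) string.toList n)

-- ===== PRECONDITION & SPEC =====
-- Pre_gds is exactly where the Python A returns: if len(string) > n the loop body runs, which
-- raises ValueError on any non-digit character (and ZeroDivisionError for n = 0), and diverges
-- for n = 1 (a pass is the identity) and for n < 0 (the string becomes "" and never satisfies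
-- l <= n); so beyond the immediate-return case len(string) <= n we need n >= 2 and all digits.
def Pre_gds (string : String) (n : Int) : Prop :=
  (string.toList.length : Int) ≤ n ∨
    (2 ≤ n ∧ string.toList.all (fun c => decide ('0' ≤ c ∧ c ≤ '9')) = true)
instance (string : String) (n : Int) : Decidable (Pre_gds string n) := by
  unfold Pre_gds; infer_instance

def pvWitness_gds : String × Int := ("1234567", 2)

def Spec_gds (string : String) (n : Int) (out : String) : Prop := out = gds_alt string n
instance (string : String) (n : Int) (out : String) : Decidable (Spec_gds string n out) := by
  unfold Spec_gds; infer_instance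

-- ===== CLAIM (what is proved, stated in full; the proofs are below) =====
def Claim_equal_gds : Prop :=
  ∀ (string : String) (n : Int), Dom_gds string n → Pre_gds string n → Spec_gds string n (gds string n)

-- ===== LEMMAS AND PROOFS =====
theorem join_nil_flatten (xs : List (List Char)) : PySem.Chars.join [] xs = xs.flatten := by
  simp [PySem.Chars.join, List.intercalate]
  induction xs with
  | nil => simp
  | cons x t ih =>
    cases t with
    | nil => simp
    | cons y t2 => simp [List.intersperse] at ih ⊢; simpa using ih

def pvSum (g : List Char) : Int := (g.map pvVal).sum

-- number of groups one pass makes out of a string of length l, group size m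
def pvK (l m : Nat) : Nat := l / m + (if 0 < l % m then 1 else 0)

-- common normal form of one pass: the group strings, in order, flattened
def pvN (m : Nat) (cs : List Char) : List Char :=
  ((List.range (pvK cs.length m)).map
    (fun j => PySem.Int.toChars (pvSum ((cs.drop (j * m)).take m)))).flatten

theorem gdsPass_normal (cs : List Char) (n : Int) (h : 1 ≤ n) :
    gdsPass cs n = pvN n.toNat cs := by
  obtain ⟨m, hm⟩ : ∃ m : Nat, n = (m : Int) := ⟨n.toNat, (Int.toNat_of_nonneg (by omega)).symm⟩
  subst hm
  rw [pvN]
  simp only [gdsPass, join_nil_flatten, PySem.Int.floordiv_natCast, PySem.Int.mod_natCast,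
    PySem.List.pyRange_one, Int.toNat_natCast]
  congr 1
  rw [List.map_map, List.map_map]
  have hk : ((↑(cs.length / m) + if 0 < (↑(cs.length % m) : Int) then 1 else 0 : Int) - 0).toNat
      = pvK cs.length m := by
    unfold pvK
    have hnn : (0 : Int) ≤ ((cs.length / m : Nat) : Int) := Int.natCast_nonneg _
    rcases Nat.eq_zero_or_pos (cs.length % m) with h0 | h0
    · rw [h0, if_neg (by norm_num), if_neg (by omega)]; omega
    · rw [if_pos (by exact_mod_cast h0), if_pos h0]; omega
  rw [hk]
  apply List.map_congr_left
  intro j _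
  have h1 : ((0 : Int) + ↑j) * ↑m = ((j * m : Nat) : Int) := by push_cast; ring
  have h2 : ((j * m : Nat) : Int) + ↑m = ((j * m + m : Nat) : Int) := by push_cast; ring
  simp only [Function.comp, h1, h2, PySem.List.slice_natCast, Nat.add_sub_cancel_left]
  rfl

theorem pvN_nil (m : Nat) : pvN m [] = [] := by
  simp [pvN, pvK]

theorem pvN_cons (m : Nat) (hm : 1 ≤ m) (cs : List Char) (h : cs ≠ []) :
    pvN m cs = PySem.Int.toChars (pvSum (cs.take m)) ++ pvN m (cs.drop m) := by
  have hl : 0 < cs.length := List.length_pos_iff.mpr h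
  by_cases hle : cs.length ≤ m
  · have hk1 : pvK cs.length m = 1 := by
      unfold pvK
      rcases eq_or_lt_of_le hle with he | hlt
      · rw [he, Nat.div_self (by omega), Nat.mod_self]; simp
      · rw [Nat.div_eq_of_lt hlt, Nat.mod_eq_of_lt hlt, if_pos hl]
    have hdrop : cs.drop m = [] := List.drop_eq_nil_of_le hle
    rw [pvN, hk1, hdrop, pvN_nil]
    simp
  · rw [not_le] at hle
    have hk : pvK cs.length m = pvK (cs.drop m).length m + 1 := by
      rw [List.length_drop]
      obtain ⟨d, hd⟩ : ∃ d, cs.length = d + m := ⟨cs.length - m, by omega⟩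
      rw [hd, Nat.add_sub_cancel]
      unfold pvK
      rw [Nat.add_div_right _ (by omega), Nat.add_mod_right]
      split_ifs <;> omega
    rw [pvN, hk, List.range_succ_eq_map, List.map_cons, List.flatten_cons]
    simp only [Nat.zero_mul, List.drop_zero]
    congr 1
    rw [pvN, List.map_map]
    apply congrArg
    apply List.map_congr_left
    intro j _
    have h3 : (cs.drop m).drop (j * m) = cs.drop (j.succ * m) := by
      rw [List.drop_drop, Nat.succ_mul, Nat.add_comm]
    simp [Function.comp, h3]

theorem foldSteps_mid (n : Int) :
    ∀ (g : List Char) (j a : Int) (parts : List (List Char)),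
      j + g.length < n → g.foldl (pvStep n) (j, a, parts) = (j + g.length, a + pvSum g, parts) := by
  intro g
  induction g with
  | nil => intro j a parts _; simp [pvSum]
  | cons c t ih =>
    intro j a parts hlt
    have hne : ((j + 1 : Int) == n) = false := by
      simp only [List.length_cons] at hlt
      rw [beq_eq_false_iff_ne]
      intro he
      omega
    rw [List.foldl_cons]
    show t.foldl (pvStep n) (pvStep n (j, a, parts) c) = _
    rw [pvStep]
    simp only [hne, Bool.false_eq_true, if_false]
    rw [ih (j + 1) (a + pvVal c) parts
      (by simp only [List.length_cons] at hlt ⊢; push_cast at hlt ⊢; omega)]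
    simp only [List.length_cons, pvSum, List.map_cons, List.sum_cons, Prod.mk.injEq]
    refine ⟨by push_cast; ring, by ring, trivial⟩

theorem foldSteps_full (n : Int) :
    ∀ (g : List Char) (j a : Int) (parts : List (List Char)),
      j + g.length = n → g ≠ [] →
      g.foldl (pvStep n) (j, a, parts) = (0, 0, parts ++ [PySem.Int.toChars (a + pvSum g)]) := by
  intro g
  induction g with
  | nil => intro j a parts _ hne; exact absurd rfl hne
  | cons c t ih =>
    intro j a parts hlen _
    rw [List.foldl_cons]
    show t.foldl (pvStep n) (pvStep n (j, a, parts) c) = _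
    cases t with
    | nil =>
      have heq : ((j + 1 : Int) == n) = true := by
        simp only [List.length_cons, List.length_nil] at hlen
        rw [beq_iff_eq]
        omega
      rw [pvStep]
      simp only [heq, if_true, List.foldl_nil]
      simp [pvSum]
    | cons d t2 =>
      have hne : ((j + 1 : Int) == n) = false := by
        simp only [List.length_cons] at hlen
        rw [beq_eq_false_iff_ne]
        intro he
        omega
      rw [pvStep]
      simp only [hne, Bool.false_eq_true, if_false]
      rw [ih (j + 1) (a + pvVal c) parts
        (by simp only [List.length_cons] at hlen ⊢; push_cast at hlen ⊢; omega) (by simp)]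
      simp only [pvSum, List.map_cons, List.sum_cons, Prod.mk.injEq]
      refine ⟨trivial, trivial, by rw [add_assoc]⟩

theorem foldSteps_parts (n : Int) :
    ∀ (l : List Char) (j a : Int) (parts : List (List Char)),
      l.foldl (pvStep n) (j, a, parts) =
        ((l.foldl (pvStep n) (j, a, [])).1, (l.foldl (pvStep n) (j, a, [])).2.1,
          parts ++ (l.foldl (pvStep n) (j, a, [])).2.2) := by
  intro l
  induction l with
  | nil => intro j a parts; simp
  | cons c t ih =>
    intro j a parts
    rw [List.foldl_cons, List.foldl_cons]
    show t.foldl (pvStep n) (pvStep n (j, a, parts) c) = _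
    rw [pvStep, pvStep]
    by_cases hc : ((j + 1 : Int) == n) = true
    · simp only [hc, if_true]
      rw [ih 0 0 (parts ++ [PySem.Int.toChars (a + pvVal c)]),
        ih 0 0 ([] ++ [PySem.Int.toChars (a + pvVal c)])]
      simp only [List.nil_append, List.append_assoc]
    · have hc' : ((j + 1 : Int) == n) = false := eq_false_of_ne_true hc
      simp only [hc', Bool.false_eq_true, if_false]
      rw [ih (j + 1) (a + pvVal c) parts, ih (j + 1) (a + pvVal c) []]

theorem reduceOnce_nil (n : Int) : reduceOnce [] n = [] := by
  simp [reduceOnce]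

theorem reduceOnce_cons (cs : List Char) (n : Int) (h : 1 ≤ n) (hcs : cs ≠ []) :
    reduceOnce cs n = PySem.Int.toChars (pvSum (cs.take n.toNat)) ++ reduceOnce (cs.drop n.toNat) n := by
  have hm : ((n.toNat : Nat) : Int) = n := Int.toNat_of_nonneg (by omega)
  have hl : 0 < cs.length := List.length_pos_iff.mpr hcs
  have hsplit : cs.foldl (pvStep n) (0, 0, []) =
      (cs.drop n.toNat).foldl (pvStep n) ((cs.take n.toNat).foldl (pvStep n) (0, 0, [])) := by
    rw [← List.foldl_append, List.take_append_drop]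
  by_cases hml : n.toNat ≤ cs.length
  · have htl : (cs.take n.toNat).length = n.toNat := by
      rw [List.length_take]; omega
    have htake : (cs.take n.toNat).foldl (pvStep n) (0, 0, []) =
        (0, 0, [] ++ [PySem.Int.toChars (0 + pvSum (cs.take n.toNat))]) :=
      foldSteps_full n _ 0 0 [] (by rw [htl]; omega) (by rw [← List.length_pos_iff, htl]; omega)
    rw [reduceOnce, hsplit, htake, foldSteps_parts n (cs.drop n.toNat) 0 0, reduceOnce]
    simp only [zero_add, List.nil_append]
    rw [join_nil_flatten, join_nil_flatten]
    split_ifs with h1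
    · simp
    · simp
  · rw [not_le] at hml
    have htake : cs.take n.toNat = cs := List.take_of_length_le (by omega)
    have hdrop : cs.drop n.toNat = [] := List.drop_eq_nil_of_le (by omega)
    rw [reduceOnce, hdrop, reduceOnce_nil, htake, List.append_nil]
    rw [foldSteps_mid n cs 0 0 [] (by rw [← hm]; exact_mod_cast by omega)]
    simp [hl]

theorem pass_eq (n : Int) (h : 1 ≤ n) : ∀ (cs : List Char), gdsPass cs n = reduceOnce cs n := by
  intro cs
  induction hind : cs.length using Nat.strong_induction_on generalizing cs with
  | _ L ih =>
    cases cs with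
    | nil => rw [gdsPass_normal _ n h, pvN_nil, reduceOnce_nil]
    | cons c cs' =>
      rw [gdsPass_normal _ n h, pvN_cons n.toNat (by omega) _ (by simp),
        reduceOnce_cons _ n h (by simp), ← gdsPass_normal _ n h]
      have hlt : ((c :: cs').drop n.toNat).length < L := by
        subst hind; rw [List.length_drop]; simp; omega
      rw [ih _ hlt _ rfl]

theorem loop_eq (n : Int) (h : 1 ≤ n) :
    ∀ (fuel : Nat) (cs : List Char), gdsLoop fuel cs n = gdsAltLoop fuel cs n := by
  intro fuel
  induction fuel with
  | zero => intro cs; rfl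
  | succ f ih =>
    intro cs
    simp only [gdsLoop, gdsAltLoop]
    split
    · rfl
    · rw [pass_eq n h, ih]

-- ===== VERDICT (by name: the statement is the Claim_ definition above) =====
theorem gds_spec : Claim_equal_gds := by
  intro s n _ hpre
  unfold Spec_gds gds gds_alt
  rcases hpre with hle | ⟨h2, _⟩
  · show String.ofList (gdsLoop (10 * s.toList.length + 1) s.toList n) = _
    rw [show 10 * s.toList.length + 1 = (10 * s.toList.length) + 1 from rfl]
    simp only [gdsLoop, gdsAltLoop]
    rw [if_pos hle, if_pos hle]
  · rw [loop_eq n (by omega)]
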